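-- pv_equiv track=rewrite | github.com/Duality4Y/py-bool-logic | LogicUtils.py | paddedTuple
-- ===== SOURCE A (Python) =====
-- def paddedTuple(size, pat=1):
--     rep = []
--     for i in range(size):
--         if pat:
--             rep.append(i % 2)
--         else:
--             rep.append(1 - (i % 2))
--     return tuple(rep)
-- ===== SOURCE B (Python) =====
-- def paddedTuple(size, pat=1):
--     pair = (0, 1) if pat else (1, 0)
--     n = max(size, 0)
--     return (pair * ((n + 1) // 2))[:n]
-- ===== Notes on version B (the rewrite author's own statement) =====
-- stated objective: simpler
-- what changed: Replaces the per-index loop with its i%2 branch by selecting a 2-element base pattern, replicating it with list multiplication and slicing to the requested length.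
import Mathlib
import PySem

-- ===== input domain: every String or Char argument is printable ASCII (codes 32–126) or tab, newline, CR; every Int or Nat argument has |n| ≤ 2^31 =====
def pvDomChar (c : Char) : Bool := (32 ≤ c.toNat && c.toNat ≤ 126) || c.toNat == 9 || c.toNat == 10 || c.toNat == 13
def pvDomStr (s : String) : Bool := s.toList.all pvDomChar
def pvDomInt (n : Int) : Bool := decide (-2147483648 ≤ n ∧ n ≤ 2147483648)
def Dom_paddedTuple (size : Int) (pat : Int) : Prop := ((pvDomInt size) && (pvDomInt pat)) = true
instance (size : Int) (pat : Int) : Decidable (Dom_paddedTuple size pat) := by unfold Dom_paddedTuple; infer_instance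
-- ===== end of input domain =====

-- B builds the alternating tuple by replicating a 2-element base pattern and slicing, instead of a per-index i%2 branch loop (simpler).

-- ===== PORT A =====
def paddedTuple (size : Int) (pat : Int) : List Int :=
  (PySem.List.pyRange 0 size 1).foldl
    (fun rep i => rep ++ [if pat ≠ 0 then PySem.Int.mod i 2 else 1 - PySem.Int.mod i 2]) []

-- ===== PORT B =====
def paddedTuple_alt (size : Int) (pat : Int) : List Int :=
  let pair : List Int := if pat ≠ 0 then [0, 1] else [1, 0]
  let n : Int := max size 0
  PySem.List.slice (List.flatten (List.replicate (PySem.Int.floordiv (n + 1) 2).toNat pair)) none (some n)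

-- ===== PRECONDITION & SPEC =====
def Spec_paddedTuple (size : Int) (pat : Int) (out : List Int) : Prop := out = paddedTuple_alt size pat
instance (size : Int) (pat : Int) (out : List Int) : Decidable (Spec_paddedTuple size pat out) := by unfold Spec_paddedTuple; infer_instance

-- ===== CLAIM (what is proved, stated in full; the proofs are below) =====
def Claim_equal_paddedTuple : Prop := ∀ (size : Int) (pat : Int), Dom_paddedTuple size pat → Spec_paddedTuple size pat (paddedTuple size pat)

-- ===== LEMMAS AND PROOFS =====

-- alternating list of length n starting with a, then b
def pvAlt (n : Nat) (a b : Int) : List Int :=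
  match n with
  | 0 => []
  | n + 1 => a :: pvAlt n b a

theorem pvAlt_snoc (n : Nat) (a b : Int) :
    pvAlt (n + 1) a b = pvAlt n a b ++ [if n % 2 = 0 then a else b] := by
  induction n generalizing a b with
  | zero => simp [pvAlt]
  | succ m ih =>
    show a :: pvAlt (m + 1) b a = (a :: pvAlt m b a) ++ _
    rw [ih]
    have : (if (m + 1) % 2 = 0 then a else b) = (if m % 2 = 0 then b else a) := by
      rcases Nat.even_or_odd m with h | h
      · simp [Nat.even_iff.mp h, Nat.succ_mod_two_eq_one_iff.mpr (Nat.even_iff.mp h)]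
      · simp [Nat.odd_iff.mp h, Nat.succ_mod_two_eq_zero_iff.mpr (Nat.odd_iff.mp h)]
    simp [this]

theorem pvRange_map_eq_alt (n : Nat) (a b : Int) :
    (List.range n).map (fun k => if k % 2 = 0 then a else b) = pvAlt n a b := by
  induction n with
  | zero => simp [pvAlt]
  | succ m ih => rw [List.range_succ, List.map_append, ih, List.map_singleton, ← pvAlt_snoc]

theorem pvTake_replicate_eq_alt (n : Nat) (a b : Int) :
    List.take n (List.flatten (List.replicate ((n + 1) / 2) [a, b])) = pvAlt n a b := by
  induction n using Nat.twoStepInduction generalizing a b with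
  | zero => simp [pvAlt]
  | one => simp [pvAlt]
  | more m ih _ =>
    have h : (m + 2 + 1) / 2 = (m + 1) / 2 + 1 := by omega
    rw [h, List.replicate_succ, List.flatten_cons]
    show List.take (m + 2) (a :: b :: _) = a :: b :: pvAlt m a b
    simp [List.take_succ_cons, ih]

-- ===== VERDICT (by name: the statement is the Claim_ definition above) =====
theorem paddedTuple_spec : Claim_equal_paddedTuple := by
  intro size pat _
  unfold Spec_paddedTuple paddedTuple paddedTuple_alt
  simp only []
  by_cases hs : size ≤ 0
  · rw [PySem.List.pyRange_one_eq_nil hs]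
    have hmax : max size 0 = 0 := by omega
    rw [hmax]
    norm_num [PySem.Int.floordiv_eq_ediv_of_pos (by omega : (0:Int) < 2), PySem.List.slice]
  · push Not at hs
    have hmax : max size 0 = size := by omega
    rw [hmax]
    set n := size.toNat with hn
    have hsz : size = (n : Int) := by omega
    have hfd : (PySem.Int.floordiv ((n : Int) + 1) 2).toNat = (n + 1) / 2 := by
      have h2 : PySem.Int.floordiv ((n : Int) + 1) 2 = (((n + 1) / 2 : Nat) : Int) := by
        exact_mod_cast PySem.Int.floordiv_natCast (n + 1) 2
      rw [h2, Int.toNat_natCast]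
    rw [hsz, PySem.List.slice_to_natCast, hfd, PySem.List.pyRange_one]
    simp only [sub_zero, Int.toNat_natCast, zero_add]
    rw [PySem.List.foldl_append_singleton_eq_map, List.nil_append]
    by_cases hp : pat ≠ 0
    · simp only [if_pos hp, List.map_map]
      rw [pvTake_replicate_eq_alt n 0 1, ← pvRange_map_eq_alt n 0 1]
      apply List.map_congr_left
      intro k _
      simp only [Function.comp_apply]
      rw [show ((2:Int)) = ((2:Nat):Int) from rfl, PySem.Int.mod_natCast]
      rcases Nat.even_or_odd k with h | h
      · simp [Nat.even_iff.mp h]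
      · simp [Nat.odd_iff.mp h]
    · simp only [if_neg hp, List.map_map]
      rw [pvTake_replicate_eq_alt n 1 0, ← pvRange_map_eq_alt n 1 0]
      apply List.map_congr_left
      intro k _
      simp only [Function.comp_apply]
      rw [show ((2:Int)) = ((2:Nat):Int) from rfl, PySem.Int.mod_natCast]
      rcases Nat.even_or_odd k with h | h
      · simp [Nat.even_iff.mp h]
      · simp [Nat.odd_iff.mp h]
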